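-- pv_equiv track=rewrite | github.com/Yomguithereal/ebbe | ebbe/functions.py | with_is_last
-- ===== SOURCE A (Python) =====
-- def with_is_last(iterable):
--     iterator = iter(iterable)
--
--     try:
--         last = next(iterator)
--     except StopIteration:
--         return
--
--     for item in iterator:
--         yield False, last
--         last = item
--
--     yield True, last
-- ===== SOURCE B (Python) =====
-- def with_is_last(iterable):
--     items = list(iterable)
--     n = len(items)
--     for i, item in enumerate(items):
--         yield i == n - 1, item
-- ===== Notes on version B (the rewrite author's own statement) =====
-- stated objective: simpler
-- what changed: B materializes the input into a list and flags last-ness by index comparison via enumerate, instead of A's streaming one-element lookahead buffer; return value identical on finite iterables (B is eager, not lazy).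
import Mathlib
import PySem

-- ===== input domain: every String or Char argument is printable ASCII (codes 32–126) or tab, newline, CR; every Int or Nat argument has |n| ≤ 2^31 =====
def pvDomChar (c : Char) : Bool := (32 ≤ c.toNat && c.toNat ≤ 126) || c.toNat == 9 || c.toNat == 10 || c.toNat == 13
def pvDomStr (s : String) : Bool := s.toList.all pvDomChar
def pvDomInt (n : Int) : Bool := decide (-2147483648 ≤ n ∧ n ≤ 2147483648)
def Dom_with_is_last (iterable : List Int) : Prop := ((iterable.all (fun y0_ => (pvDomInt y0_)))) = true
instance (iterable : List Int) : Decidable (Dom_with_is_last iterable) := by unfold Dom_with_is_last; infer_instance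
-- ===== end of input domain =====

-- B materializes the list and flags last-ness by index comparison instead of A's one-element lookahead buffer (objective: simpler). The Python A/B are generators; equivalence is about the fully-consumed sequence of yielded values.
-- ===== PORT A =====
-- loop 'for item in iterator: yield False, last; last = item' then 'yield True, last'
def withIsLastLoop (last : Int) : List Int → List (Bool × Int)
  | [] => [(true, last)]
  | item :: rest => (false, last) :: withIsLastLoop item rest

def with_is_last (iterable : List Int) : List (Bool × Int) :=
  match iterable with
  | [] => []                      -- StopIteration on first next: return
  | first :: rest => withIsLastLoop first rest

-- ===== PORT B =====
def with_is_last_alt (iterable : List Int) : List (Bool × Int) :=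
  let n : Int := iterable.length
  (PySem.List.enumerate iterable).map (fun p => (decide (p.1 = n - 1), p.2))

-- ===== PRECONDITION & SPEC =====
def Spec_with_is_last (iterable : List Int) (out : List (Bool × Int)) : Prop := out = with_is_last_alt iterable
instance (iterable : List Int) (out : List (Bool × Int)) : Decidable (Spec_with_is_last iterable out) := by unfold Spec_with_is_last; infer_instance

-- ===== CLAIM (what is proved, stated in full; the proofs are below) =====
def Claim_equal_with_is_last : Prop := ∀ (iterable : List Int), Dom_with_is_last iterable → Spec_with_is_last iterable (with_is_last iterable)

-- ===== LEMMAS AND PROOFS =====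
-- loop invariant: the lookahead loop over 'rest' with buffer 'last' equals the
-- index-flagged map over 'last :: rest' started at index s, with s + |rest| the last index.
theorem withIsLastLoop_eq (last : Int) (rest : List Int) (s : Int) :
    withIsLastLoop last rest =
      (PySem.List.enumerate (last :: rest) s).map
        (fun p => (decide (p.1 = s + rest.length), p.2)) := by
  induction rest generalizing last s with
  | nil => simp [withIsLastLoop, PySem.List.enumerate_cons, PySem.List.enumerate_nil]
  | cons x xs ih =>
      rw [PySem.List.enumerate_cons, List.map_cons, withIsLastLoop, ih x (s + 1)]
      have h1 : (decide (s = s + ((x :: xs).length : Int)) ) = false := by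
        simp only [List.length_cons]; simp; omega
      have h2 : (fun (p : Int × Int) => (decide (p.1 = s + 1 + (xs.length : Int)), p.2)) =
          (fun (p : Int × Int) => (decide (p.1 = s + ((x :: xs).length : Int)), p.2)) := by
        funext p
        have : (p.1 = s + 1 + (xs.length : Int)) ↔ (p.1 = s + ((x :: xs).length : Int)) := by
          simp only [List.length_cons]; push_cast; omega
        simp [this]
      rw [h1, h2]

-- ===== VERDICT (by name: the statement is the Claim_ definition above) =====
theorem with_is_last_spec : Claim_equal_with_is_last := by
  intro iterable _
  unfold Spec_with_is_last
  cases iterable with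
  | nil => simp [with_is_last, with_is_last_alt, PySem.List.enumerate_nil]
  | cons x xs =>
      simp only [with_is_last, with_is_last_alt]
      rw [withIsLastLoop_eq x xs 0]
      congr 1
      funext p
      simp only [Prod.mk.injEq, decide_eq_decide, List.length_cons, and_true]
      push_cast
      omega
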